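-- pv_equiv track=rewrite | github.com/bhcrane91/ProjectEuler | problems/885/P885.py | f
-- ===== SOURCE A (Python) =====
-- def f(d):
--     digits = []
--     while d > 0:
--         l = d % 10
--         d = (d - l) // 10
--         if l != 0:
--             digits.append(str(l))
--     return "".join(sorted(digits))
-- ===== SOURCE B (Python) =====
-- def f(d):
--     if d <= 0:
--         return ""
--     return "".join(sorted(c for c in str(d) if c != "0"))
-- ===== Notes on version B (the rewrite author's own statement) =====
-- stated objective: idiomatic
-- what changed: Replaces the modulo/division digit-extraction loop with iterating over str(d)'s characters, filtering out '0' and joining the sorted characters; the non-positive case is an explicit early return.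
import Mathlib
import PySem

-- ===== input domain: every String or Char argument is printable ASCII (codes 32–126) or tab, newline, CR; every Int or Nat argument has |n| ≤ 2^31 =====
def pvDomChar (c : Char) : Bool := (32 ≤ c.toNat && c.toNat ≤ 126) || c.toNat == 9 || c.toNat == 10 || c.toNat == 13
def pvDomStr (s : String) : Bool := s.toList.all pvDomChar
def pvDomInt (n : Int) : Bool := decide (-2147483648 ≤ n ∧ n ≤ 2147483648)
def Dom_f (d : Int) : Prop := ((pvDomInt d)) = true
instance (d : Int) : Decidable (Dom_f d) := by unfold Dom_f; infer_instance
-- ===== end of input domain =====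

-- B replaces A's modulo/division digit-extraction loop by filtering and sorting
-- the characters of str(d) (idiomatic; non-positive inputs return "" in both).

-- ===== PORT A =====
-- the 'while d > 0' loop of A, carrying the 'digits' accumulator
def fLoop (d : Int) (digits : List String) : List String :=
  if _h : 0 < d then
    fLoop (PySem.Int.floordiv (d - PySem.Int.mod d 10) 10)
      (if PySem.Int.mod d 10 ≠ 0 then digits ++ [PySem.Int.toStr (PySem.Int.mod d 10)]
       else digits)
  else digits
termination_by d.toNat
decreasing_by
  rw [PySem.Int.mod_eq_emod_of_pos (a := d) (by norm_num : (0:Int) < 10),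
    PySem.Int.floordiv_eq_ediv_of_pos (by norm_num : (0:Int) < 10)]
  omega

def f (d : Int) : String :=
  PySem.Str.join "" (PySem.List.sorted (fLoop d []) (fun s => s))

-- ===== PORT B =====
-- ''.join over a sorted list of single characters is String.ofList of the sorted chars (exact)
def f_alt (d : Int) : String :=
  if d ≤ 0 then ""
  else String.ofList
    (PySem.List.sorted (((PySem.Int.toStr d).toList).filter (fun c => c != '0')) (fun c => c))

-- ===== PRECONDITION & SPEC =====
def Spec_f (d : Int) (out : String) : Prop := out = f_alt d
instance (d : Int) (out : String) : Decidable (Spec_f d out) := by unfold Spec_f; infer_instance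

-- ===== CLAIM (what is proved, stated in full; the proofs are below) =====
def Claim_equal_f : Prop := ∀ (d : Int), Dom_f d → Spec_f d (f d)

-- ===== LEMMAS AND PROOFS =====

-- Nat.toDigitsCore with enough fuel is the reversed little-endian digit list
lemma toDigitsCore_eq (fuel n : Nat) (ds : List Char) (hn : 0 < n) (hf : n < fuel) :
    Nat.toDigitsCore 10 fuel n ds = ((Nat.digits 10 n).map Nat.digitChar).reverse ++ ds := by
  induction fuel generalizing n ds with
  | zero => omega
  | succ fuel ih =>
    rw [Nat.toDigitsCore]
    by_cases h : n / 10 = 0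
    · simp only [h, if_pos]
      rw [Nat.digits_def' (by norm_num) hn]
      have hnil : Nat.digits 10 (n / 10) = [] := by rw [h]; simp
      simp [hnil]
    · simp only [h, if_false]
      rw [ih (n / 10) _ (Nat.pos_of_ne_zero h) (by omega)]
      rw [Nat.digits_def' (by norm_num) hn]
      simp

-- str(d) for d > 0, as the reversed digit list
lemma toChars_pos (d : Int) (hd : 0 < d) :
    PySem.Int.toChars d = ((Nat.digits 10 d.toNat).map Nat.digitChar).reverse := by
  rw [PySem.Int.toChars, if_neg (by omega)]
  rw [Nat.toDigits, toDigitsCore_eq _ _ _ (by omega) (by omega)]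
  simp

-- A's loop collects the nonzero little-endian digits as strings
lemma fLoop_eq (d : Int) (acc : List String) :
    fLoop d acc =
      acc ++ ((Nat.digits 10 d.toNat).filter (fun k => k ≠ 0)).map
        (fun k : Nat => PySem.Int.toStr (k : Int)) := by
  by_cases hd : 0 < d
  · rw [fLoop, dif_pos hd]
    have h10 : (0:Int) < 10 := by norm_num
    have hm : PySem.Int.mod d 10 = d % 10 := PySem.Int.mod_eq_emod_of_pos h10
    have hfd : PySem.Int.floordiv (d - PySem.Int.mod d 10) 10 = (d - d % 10) / 10 := by
      rw [hm]; exact PySem.Int.floordiv_eq_ediv_of_pos h10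
    have hrec := fLoop_eq ((d - d % 10) / 10)
    have hdig : Nat.digits 10 d.toNat = d.toNat % 10 :: Nat.digits 10 (d.toNat / 10) :=
      Nat.digits_def' (by norm_num) (by omega)
    have htn : ((d - d % 10) / 10).toNat = d.toNat / 10 := by omega
    by_cases hl : d % 10 = 0
    · have hnot : ¬ (PySem.Int.mod d 10 ≠ 0) := by rw [hm]; simpa using hl
      rw [if_neg hnot, hfd, hrec, htn, hdig]
      have h0 : d.toNat % 10 = 0 := by omega
      simp [h0]
    · have hyes : PySem.Int.mod d 10 ≠ 0 := by rw [hm]; exact hl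
      rw [if_pos hyes, hfd, hrec, htn, hdig]
      have hne : d.toNat % 10 ≠ 0 := by omega
      have hcast : (d % 10) = ((d.toNat % 10 : Nat) : Int) := by omega
      simp [hne, hcast]
  · rw [fLoop, dif_neg hd]
    have h0 : d.toNat = 0 := by omega
    simp [h0]
termination_by d.toNat
decreasing_by omega

-- str(l) for a single digit l ∈ 1..9 is that digit's character
lemma toStr_digit (k : Nat) (h1 : 0 < k) (h9 : k < 10) :
    PySem.Int.toStr (k : Int) = String.ofList [Nat.digitChar k] := by
  interval_cases k <;> rfl

-- the digit character of a base-10 digit is '0' exactly for the digit 0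
lemma digitChar_ne_zero (k : Nat) (hk : k < 10) :
    (Nat.digitChar k != '0') = decide (k ≠ 0) := by
  interval_cases k <;> rfl

-- singleton strings are ordered like their characters
lemma singleton_le (c c' : Char) (h : c ≤ c') :
    String.ofList [c] ≤ String.ofList [c'] := by
  rcases eq_or_lt_of_le h with rfl | hlt
  · exact le_refl _
  · apply le_of_lt
    have e1 : (String.ofList [c]).toList = [c] := by simp
    have e2 : (String.ofList [c']).toList = [c'] := by simp
    rw [String.lt_iff_toList_lt, e1, e2]
    exact List.cons_lt_cons_iff.mpr (Or.inl hlt)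

-- sorting singleton strings is sorting the characters
lemma sorted_map_singleton (M : List Char) :
    PySem.List.sorted (M.map (fun c => String.ofList [c])) (fun s => s) =
      (PySem.List.sorted M (fun c => c)).map (fun c => String.ofList [c]) := by
  apply PySem.List.sorted_id_eq_of_perm_of_pairwise
  · exact (PySem.List.sorted_perm M _ false).map _
  · exact List.Pairwise.map _ (fun a b hab => singleton_le a b hab)
      (PySem.List.sorted_pairwise M _)

-- ''.join over singleton strings
lemma join_singletons (S : List Char) :
    PySem.Str.join "" (S.map (fun c => String.ofList [c])) = String.ofList S := by
  have h : (PySem.Str.join "" (S.map (fun c => String.ofList [c]))).toList = S := by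
    rw [PySem.Str.toList_join]
    have hmap : (S.map (fun c => String.ofList [c])).map String.toList
        = S.map (fun c => [c]) := by
      rw [List.map_map]
      apply List.map_congr_left
      intro c _
      simp
    simp only [hmap]
    simp [PySem.Chars.join_nil_singletons S]
  calc PySem.Str.join "" (S.map (fun c => String.ofList [c]))
      = String.ofList (PySem.Str.join "" (S.map (fun c => String.ofList [c]))).toList :=
        String.ofList_toList.symm
    _ = String.ofList S := by rw [h]

theorem main_eq (d : Int) : f d = f_alt d := by
  by_cases hd : 0 < d
  · have hD : ∀ k ∈ Nat.digits 10 d.toNat, k < 10 :=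
      fun k hk => Nat.digits_lt_base (by norm_num) hk
    unfold f f_alt
    rw [if_neg (by omega), fLoop_eq]
    simp only [List.nil_append]
    have hmapA : ((Nat.digits 10 d.toNat).filter (fun k => k ≠ 0)).map
          (fun k : Nat => PySem.Int.toStr (k : Int))
        = (((Nat.digits 10 d.toNat).filter (fun k => k ≠ 0)).map Nat.digitChar).map
          (fun c => String.ofList [c]) := by
      rw [List.map_map]
      apply List.map_congr_left
      intro k hk
      rcases List.mem_filter.mp hk with ⟨hkm, hk0⟩
      exact toStr_digit k (Nat.pos_of_ne_zero (by simpa using hk0)) (hD k hkm)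
    rw [hmapA, sorted_map_singleton, join_singletons]
    congr 1
    have hBlist : (PySem.Int.toStr d).toList.filter (fun c => c != '0')
        = (((Nat.digits 10 d.toNat).filter (fun k => k ≠ 0)).map Nat.digitChar).reverse := by
      rw [PySem.Int.toList_toStr, toChars_pos d hd, List.filter_reverse, List.filter_map]
      congr 2
      apply List.filter_congr
      intro k hk
      simpa using digitChar_ne_zero k (hD k hk)
    rw [hBlist]
    exact (PySem.List.sorted_id_eq_sorted_id_iff_perm _ _).mpr
      (List.reverse_perm _).symm
  · unfold f f_alt
    rw [if_pos (by omega), fLoop_eq]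
    have h0 : d.toNat = 0 := by omega
    simp [h0]
    rfl

-- ===== VERDICT (by name: the statement is the Claim_ definition above) =====
theorem f_spec : Claim_equal_f := by
  intro d _
  unfold Spec_f
  exact main_eq d
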